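-- pv_equiv track=rewrite | github.com/Zurri13/SYAP | 2.3.py | sum_of_columns
-- ===== SOURCE A (Python) =====
-- def sum_of_columns(matrix):
--     num_rows = len(matrix)
--     num_cols = len(matrix[0]) if num_rows > 0 else 0
--
--     if num_rows == 0 or num_cols == 0:
--         return "Матрица пустая"
--
--     column_sums = [0] * num_cols
--
--     for col in range (num_cols):
--         has_negative = False
--
--         for row in range(num_rows):
--             if matrix[row][col] < 0:
--                 has_negative = True
--                 break
--
--         if not has_negative:
--             column_sums[col] = sum(matrix[row][col] for row in range(num_rows))
--
--     return sum(column_sums)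
-- ===== SOURCE B (Python) =====
-- def sum_of_columns(matrix):
--     if not matrix or not matrix[0]:
--         return "Матрица пустая"
--     num_cols = len(matrix[0])
--     state = [(0, False)] * num_cols
--     for row in matrix:
--         state = [(s + row[c], bad or row[c] < 0) for c, (s, bad) in enumerate(state)]
--     return sum(s for s, bad in state if not bad)
-- ===== Notes on version B (the rewrite author's own statement) =====
-- stated objective: alternative
-- what changed: Replaces A's column-by-column detect-the-negative-then-resum nested passes with a single row-major pass that accumulates every column's running sum and a bad-column flag simultaneously, then sums the unflagged columns.
-- outside the precondition, e.g. on sum_of_columns([[-1, -2], [3]]): A returns 0, B raises IndexError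
import Mathlib
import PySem

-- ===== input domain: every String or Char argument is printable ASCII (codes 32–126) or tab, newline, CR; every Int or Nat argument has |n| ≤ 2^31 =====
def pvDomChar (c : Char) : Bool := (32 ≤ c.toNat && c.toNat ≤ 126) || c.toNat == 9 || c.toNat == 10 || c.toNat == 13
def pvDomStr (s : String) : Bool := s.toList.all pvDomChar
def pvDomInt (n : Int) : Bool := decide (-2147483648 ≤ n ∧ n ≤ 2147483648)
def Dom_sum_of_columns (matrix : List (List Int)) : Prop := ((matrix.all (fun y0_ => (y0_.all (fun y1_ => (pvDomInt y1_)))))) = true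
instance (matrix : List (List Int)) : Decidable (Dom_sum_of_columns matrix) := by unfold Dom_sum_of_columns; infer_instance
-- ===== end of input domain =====

-- B does one row-major pass accumulating each column's sum and a bad-column flag, instead of
-- A's column-by-column negative-detection scan followed by a second summation pass; same cost.

-- ===== PORT A =====
-- A returns the string "Матрица пустая" on empty matrices and raises IndexError on ragged
-- matrices whose scan reaches a short row; both are outside Pre_ and the port returns 0 there.
def sum_of_columns (matrix : List (List Int)) : Int :=
  let num_rows := matrix.length
  let num_cols := if num_rows > 0 then (matrix.headD []).length else 0
  if num_rows = 0 ∨ num_cols = 0 then 0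
  else
    -- for col in range(num_cols): inner scan for a negative (with break), else resum the column
    let column_sums := (List.range num_cols).map (fun (col : Nat) =>
      if matrix.any (fun row => ((PySem.List.pyGet? row ((col : Int))).getD 0) < 0) then 0
      else matrix.foldl (fun s row => s + (PySem.List.pyGet? row ((col : Int))).getD 0) 0)
    column_sums.foldl (· + ·) 0

-- ===== PORT B =====
def sum_of_columns_alt (matrix : List (List Int)) : Int :=
  if matrix = [] ∨ matrix.headD [] = [] then 0
  else
    let num_cols := (matrix.headD []).length
    -- single row-major pass: state[c] = (running sum of column c, column c saw a negative)
    let state := matrix.foldl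
      (fun st row => (PySem.List.enumerate st).map (fun p =>
        (p.2.1 + (PySem.List.pyGet? row p.1).getD 0,
         p.2.2 || decide ((PySem.List.pyGet? row p.1).getD 0 < 0))))
      (List.replicate num_cols ((0 : Int), false))
    state.foldl (fun acc p => if p.2 then acc else acc + p.1) 0

-- ===== PRECONDITION & SPEC =====
-- Pre_ excludes empty matrices (A returns a Russian string, not an int) and ragged matrices
-- with a row shorter than row 0: B's row-major pass reads every entry of every row and raises
-- IndexError on all such inputs (A mostly raises too, unless an earlier negative breaks its
-- column scan before the short row is reached).
def Pre_sum_of_columns (matrix : List (List Int)) : Prop :=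
  matrix ≠ [] ∧ matrix.headD [] ≠ [] ∧
    ∀ row ∈ matrix, (matrix.headD []).length ≤ row.length
instance (matrix : List (List Int)) : Decidable (Pre_sum_of_columns matrix) := by
  unfold Pre_sum_of_columns; infer_instance
def pvWitness_sum_of_columns : List (List Int) := [[1, -2], [3, 4]]
def Spec_sum_of_columns (matrix : List (List Int)) (out : Int) : Prop := out = sum_of_columns_alt matrix
instance (matrix : List (List Int)) (out : Int) : Decidable (Spec_sum_of_columns matrix out) := by unfold Spec_sum_of_columns; infer_instance

-- ===== CLAIM (what is proved, stated in full; the proofs are below) =====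
def Claim_equal_sum_of_columns : Prop := ∀ (matrix : List (List Int)), Dom_sum_of_columns matrix → Pre_sum_of_columns matrix → Spec_sum_of_columns matrix (sum_of_columns matrix)

-- ===== LEMMAS AND PROOFS =====

-- the value A and B both read at column c of a row
def colVal (row : List Int) (c : Nat) : Int := (PySem.List.pyGet? row (c : Int)).getD 0

def colSum (rs : List (List Int)) (c : Nat) : Int :=
  rs.foldl (fun s row => s + colVal row c) 0

def colNeg (rs : List (List Int)) (c : Nat) : Bool :=
  rs.any (fun row => colVal row c < 0)

-- B's row step
def bStep (st : List (Int × Bool)) (row : List Int) : List (Int × Bool) :=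
  (PySem.List.enumerate st).map (fun p =>
    (p.2.1 + (PySem.List.pyGet? row p.1).getD 0,
     p.2.2 || decide ((PySem.List.pyGet? row p.1).getD 0 < 0)))

theorem foldl_add_shift (rs : List (List Int)) (c : Nat) (a : Int) :
    rs.foldl (fun s row => s + colVal row c) a = a + colSum rs c := by
  rw [colSum, PySem.List.foldl_add, PySem.List.foldl_add]; simp

theorem colSum_cons (r : List Int) (rs : List (List Int)) (c : Nat) :
    colSum (r :: rs) c = colVal r c + colSum rs c := by
  rw [colSum, List.foldl_cons, foldl_add_shift]; simp

theorem colNeg_cons (r : List Int) (rs : List (List Int)) (c : Nat) :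
    colNeg (r :: rs) c = (decide (colVal r c < 0) || colNeg rs c) := by
  simp [colNeg]

theorem bStep_getElem? (st : List (Int × Bool)) (row : List Int) (c : Nat) :
    (bStep st row)[c]? =
      st[c]?.map (fun p => (p.1 + colVal row c, p.2 || decide (colVal row c < 0))) := by
  simp [bStep, PySem.List.getElem?_enumerate, colVal]
  cases st[c]? <;> simp

theorem foldl_bStep_getElem? (rs : List (List Int)) (st : List (Int × Bool)) (c : Nat) :
    (rs.foldl bStep st)[c]? =
      st[c]?.map (fun p => (p.1 + colSum rs c, p.2 || colNeg rs c)) := by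
  induction rs generalizing st with
  | nil =>
    simp only [List.foldl_nil, colSum, colNeg, List.any_nil]
    cases st[c]? <;> simp
  | cons r rs ih =>
    rw [List.foldl_cons, ih, bStep_getElem?, colSum_cons, colNeg_cons]
    cases st[c]? <;> simp [add_assoc, Bool.or_assoc]

theorem state_eq (matrix : List (List Int)) (n : Nat) :
    matrix.foldl bStep (List.replicate n ((0 : Int), false)) =
      (List.range n).map (fun c => (colSum matrix c, colNeg matrix c)) := by
  apply List.ext_getElem?
  intro c
  rw [foldl_bStep_getElem?]
  by_cases hc : c < n <;>
    simp [hc]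

theorem final_sum (matrix : List (List Int)) (n : Nat) :
    ((List.range n).map (fun c => (colSum matrix c, colNeg matrix c))).foldl
        (fun acc p => if p.2 then acc else acc + p.1) 0 =
      ((List.range n).map (fun col =>
        if colNeg matrix col then 0 else colSum matrix col)).foldl (· + ·) 0 := by
  rw [List.foldl_map, List.foldl_map]
  apply PySem.List.foldl_congr_mem
  intro acc c _
  by_cases h : colNeg matrix c <;> simp [h]

theorem A_eq (m : List Int) (ms : List (List Int)) (hm : m ≠ []) :
    sum_of_columns (m :: ms) =
      ((List.range m.length).map (fun col =>
        if colNeg (m :: ms) col then 0 else colSum (m :: ms) col)).foldl (· + ·) 0 := by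
  unfold sum_of_columns
  rw [if_neg]
  · rfl
  · simp [hm]

theorem B_eq (m : List Int) (ms : List (List Int)) (hm : m ≠ []) :
    sum_of_columns_alt (m :: ms) =
      ((m :: ms).foldl bStep (List.replicate m.length ((0 : Int), false))).foldl
        (fun acc p => if p.2 then acc else acc + p.1) 0 := by
  unfold sum_of_columns_alt
  rw [if_neg]
  · rfl
  · simp [hm]

-- ===== VERDICT (by name: the statement is the Claim_ definition above) =====
theorem sum_of_columns_spec : Claim_equal_sum_of_columns := by
  intro matrix _ hpre
  obtain ⟨hne, hhd, -⟩ := hpre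
  obtain ⟨m, ms, rfl⟩ := List.exists_cons_of_ne_nil hne
  have hm : m ≠ [] := by simpa using hhd
  unfold Spec_sum_of_columns
  rw [A_eq m ms hm, B_eq m ms hm, state_eq, final_sum]
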